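-- pv_equiv track=rewrite | github.com/scikit-learn/scikit-learn | venv/lib/python3.5/site-packages/_pytest/assertion/truncate.py | _truncate_by_char_count
-- ===== SOURCE A (Python) =====
-- def _truncate_by_char_count(input_lines, max_chars):
--     # Check if truncation required
--     if len("".join(input_lines)) <= max_chars:
--         return input_lines
--
--     # Find point at which input length exceeds total allowed length
--     iterated_char_count = 0
--     for iterated_index, input_line in enumerate(input_lines):
--         if iterated_char_count + len(input_line) > max_chars:
--             break
--         iterated_char_count += len(input_line)
--
--     # Create truncated explanation with modified final line
--     truncated_result = input_lines[:iterated_index]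
--     final_line = input_lines[iterated_index]
--     if final_line:
--         final_line_truncate_point = max_chars - iterated_char_count
--         final_line = final_line[:final_line_truncate_point]
--     truncated_result.append(final_line)
--     return truncated_result
-- ===== SOURCE B (Python) =====
-- def _truncate_by_char_count(input_lines, max_chars):
--     # Cumulative character counts: prefix[i] = total length of the first i lines.
--     prefix = [0]
--     for line in input_lines:
--         prefix.append(prefix[-1] + len(line))
--
--     # No truncation needed
--     if prefix[-1] <= max_chars:
--         return input_lines
--
--     # Binary search over the prefix sums for the first line index whose
--     # cumulative count exceeds max_chars (prefix is nondecreasing).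
--     lo, hi = 0, len(input_lines) - 1
--     while lo < hi:
--         mid = (lo + hi) // 2
--         if prefix[mid + 1] > max_chars:
--             hi = mid
--         else:
--             lo = mid + 1
--
--     return input_lines[:lo] + [input_lines[lo][:max_chars - prefix[lo]]]
-- ===== Notes on version B (the rewrite author's own statement) =====
-- stated objective: alternative
-- what changed: Replaces A's linear budget-scan for the break line with a precomputed prefix-sum table and a hand-written binary search over it for the first cumulative count exceeding max_chars, then assembles the truncated list from the found index.
import Mathlib
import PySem

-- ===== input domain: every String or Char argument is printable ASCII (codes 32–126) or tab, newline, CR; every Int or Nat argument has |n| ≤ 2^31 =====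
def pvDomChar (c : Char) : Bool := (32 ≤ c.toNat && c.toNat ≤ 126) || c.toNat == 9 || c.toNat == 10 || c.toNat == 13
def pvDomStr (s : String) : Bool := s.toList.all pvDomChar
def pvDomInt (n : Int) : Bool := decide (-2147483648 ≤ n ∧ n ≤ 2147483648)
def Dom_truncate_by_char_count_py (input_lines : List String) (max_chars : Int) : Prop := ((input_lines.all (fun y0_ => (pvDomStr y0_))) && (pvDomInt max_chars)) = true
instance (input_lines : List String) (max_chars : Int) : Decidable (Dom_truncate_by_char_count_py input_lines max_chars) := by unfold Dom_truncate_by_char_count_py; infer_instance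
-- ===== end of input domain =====

-- B replaces A's linear break-index scan with a precomputed prefix-sum table and a
-- hand-written binary search over it (objective: alternative); return values agree on Pre_.

-- ===== PORT A =====
-- the 'for iterated_index, input_line in enumerate(input_lines): if …: break; iterated_char_count += …'
-- loop: returns (iterated_index, iterated_char_count) at the break (or after the last iteration).
def pvFindIdxA (lines : List String) (m : Int) (i : Int) (c : Int) : Int × Int :=
  match lines with
  | [] => (i - 1, c)
  | l :: ls =>
      if c + PySem.Str.len l > m then (i, c)
      else pvFindIdxA ls m (i + 1) (c + PySem.Str.len l)

def truncate_by_char_count_py (input_lines : List String) (max_chars : Int) : List String :=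
  if PySem.Str.len (PySem.Str.join "" input_lines) ≤ max_chars then input_lines
  else
    let p := pvFindIdxA input_lines max_chars 0 0
    let truncated := PySem.List.slice input_lines none (some p.1)
    let fl := (PySem.List.pyGet? input_lines p.1).getD ""   -- index in range whenever Pre_ holds
    let fl := if fl ≠ "" then PySem.Str.slice fl none (some (max_chars - p.2)) else fl
    truncated ++ [fl]

-- ===== PORT B =====
-- prefix = [0]; for line in input_lines: prefix.append(prefix[-1] + len(line))
def pvPrefixB (lines : List String) : List Int :=
  lines.foldl (fun acc l => acc ++ [((PySem.List.pyGet? acc (-1)).getD 0) + PySem.Str.len l]) [0]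

-- while lo < hi: mid = (lo+hi)//2; if prefix[mid+1] > m: hi = mid else: lo = mid+1
-- (fuel = hi - lo + 1 bounds the iteration count; it only makes the loop total)
def pvBsearchGo (fuel : Nat) (pfx : List Int) (m : Int) (lo hi : Int) : Int :=
  match fuel with
  | 0 => lo
  | fuel + 1 =>
      if lo < hi then
        let mid := PySem.Int.floordiv (lo + hi) 2
        if ((PySem.List.pyGet? pfx (mid + 1)).getD 0) > m then pvBsearchGo fuel pfx m lo mid
        else pvBsearchGo fuel pfx m (mid + 1) hi
      else lo

def pvBsearchB (pfx : List Int) (m : Int) (lo hi : Int) : Int :=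
  pvBsearchGo ((hi - lo).toNat + 1) pfx m lo hi

def truncate_by_char_count_py_alt (input_lines : List String) (max_chars : Int) : List String :=
  let pfx := pvPrefixB input_lines
  if ((PySem.List.pyGet? pfx (-1)).getD 0) ≤ max_chars then input_lines
  else
    let lo := pvBsearchB pfx max_chars 0 ((input_lines.length : Int) - 1)
    PySem.List.slice input_lines none (some lo) ++
      [PySem.Str.slice ((PySem.List.pyGet? input_lines lo).getD "") none
        (some (max_chars - (PySem.List.pyGet? pfx lo).getD 0))]

-- ===== PRECONDITION & SPEC =====
-- Pre_ excludes only the inputs where both Pythons raise: the empty list with negative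
-- max_chars (A: UnboundLocalError from the never-entered loop; B: IndexError on input_lines[lo]).
def Pre_truncate_by_char_count_py (input_lines : List String) (max_chars : Int) : Prop :=
  input_lines ≠ [] ∨ 0 ≤ max_chars
instance (input_lines : List String) (max_chars : Int) : Decidable (Pre_truncate_by_char_count_py input_lines max_chars) := by unfold Pre_truncate_by_char_count_py; infer_instance

def pvWitness_truncate_by_char_count_py : List String × Int := (["ab", "cd"], 3)

def Spec_truncate_by_char_count_py (input_lines : List String) (max_chars : Int) (out : List String) : Prop := out = truncate_by_char_count_py_alt input_lines max_chars
instance (input_lines : List String) (max_chars : Int) (out : List String) : Decidable (Spec_truncate_by_char_count_py input_lines max_chars out) := by unfold Spec_truncate_by_char_count_py; infer_instance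

-- ===== CLAIM (what is proved, stated in full; the proofs are below) =====
def Claim_equal_truncate_by_char_count_py : Prop := ∀ (input_lines : List String) (max_chars : Int), Dom_truncate_by_char_count_py input_lines max_chars → Pre_truncate_by_char_count_py input_lines max_chars → Spec_truncate_by_char_count_py input_lines max_chars (truncate_by_char_count_py input_lines max_chars)

-- ===== LEMMAS AND PROOFS =====

-- sum of the lengths of the first k lines
def pvCsum (lines : List String) (k : Nat) : Int :=
  ((lines.take k).map (fun l => (PySem.Str.len l : Int))).sum

-- reference prefix-sum list
def pvPrefList (lines : List String) (s : Int) : List Int :=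
  match lines with
  | [] => [s]
  | l :: ls => s :: pvPrefList ls (s + PySem.Str.len l)

theorem pvPrefList_ne_nil (lines : List String) (s : Int) : pvPrefList lines s ≠ [] := by
  cases lines <;> simp [pvPrefList]

theorem pvPrefixB_gen (lines : List String) (pre : List Int) (s : Int) :
    lines.foldl (fun acc l => acc ++ [((PySem.List.pyGet? acc (-1)).getD 0) + PySem.Str.len l])
      (pre ++ [s]) = pre ++ pvPrefList lines s := by
  induction lines generalizing pre s with
  | nil => simp [pvPrefList]
  | cons l ls ih =>
    simp only [List.foldl_cons, pvPrefList]
    rw [PySem.List.pyGet?_neg_one_append_singleton]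
    have := ih (pre ++ [s]) (s + PySem.Str.len l)
    simpa using this

theorem pvPrefixB_eq (lines : List String) : pvPrefixB lines = pvPrefList lines 0 := by
  have := pvPrefixB_gen lines [] 0
  simpa [pvPrefixB] using this

theorem pvPrefList_get (lines : List String) (s : Int) (k : Nat) (hk : k ≤ lines.length) :
    (pvPrefList lines s)[k]? = some (s + pvCsum lines k) := by
  induction lines generalizing s k with
  | nil =>
    have hk0 : k = 0 := by simpa using hk
    subst hk0
    simp [pvPrefList, pvCsum]
  | cons l ls ih =>
    cases k with
    | zero => simp [pvPrefList, pvCsum]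
    | succ k =>
      simp only [pvPrefList, List.getElem?_cons_succ]
      rw [ih (s + PySem.Str.len l) k (by simpa using hk)]
      simp [pvCsum, List.take_succ_cons]
      ring

theorem pvPrefList_getLast (lines : List String) (s : Int) :
    (pvPrefList lines s).getLast? = some (s + pvCsum lines lines.length) := by
  induction lines generalizing s with
  | nil => simp [pvPrefList, pvCsum]
  | cons l ls ih =>
    simp only [pvPrefList]
    have hrw : (s :: pvPrefList ls (s + PySem.Str.len l)).getLast? = (pvPrefList ls (s + PySem.Str.len l)).getLast? := by
      cases hpl : pvPrefList ls (s + PySem.Str.len l) with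
      | nil => exact absurd hpl (pvPrefList_ne_nil ls _)
      | cons b bs => simp [List.getLast?]
    rw [hrw, ih (s + PySem.Str.len l)]
    simp [pvCsum, List.take_succ_cons]
    ring

-- len("".join(lines)) is the sum of the line lengths
theorem pvLenJoin (lines : List String) :
    (PySem.Str.len (PySem.Str.join "" lines) : Int) = pvCsum lines lines.length := by
  rw [pvCsum, List.take_length]
  induction lines with
  | nil => simp [PySem.Str.join, PySem.Chars.join]
  | cons l ls ih =>
    simp only [PySem.Str.len_eq, PySem.Str.toList_join] at ih ⊢
    cases ls with
    | nil => simp [PySem.Chars.join_singleton]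
    | cons l2 r =>
      simp only [List.map_cons] at ih ⊢
      rw [PySem.Chars.join_cons_cons]
      simp at ih ⊢
      omega

theorem pvCsum_mono (lines : List String) (i j : Nat) (hij : i ≤ j) :
    pvCsum lines i ≤ pvCsum lines j := by
  unfold pvCsum
  rw [← List.take_append_drop i (lines.take j), List.take_take, min_eq_left hij,
      List.map_append, List.sum_append]
  have : 0 ≤ (((lines.take j).drop i).map (fun l => (PySem.Str.len l : Int))).sum := by
    apply List.sum_nonneg
    intro x hx
    simp only [List.mem_map] at hx
    obtain ⟨a, _, rfl⟩ := hx
    simp [PySem.Str.len_eq]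
  omega

-- shift lemma for A's loop state
theorem pvFindIdxA_shift (ls : List String) (m i c : Int) :
    pvFindIdxA ls m i c = (i + (pvFindIdxA ls (m - c) 0 0).1, c + (pvFindIdxA ls (m - c) 0 0).2) := by
  induction ls generalizing m i c with
  | nil => simp [pvFindIdxA]; omega
  | cons l ls ih =>
    simp only [pvFindIdxA]
    by_cases hb : c + PySem.Str.len l > m
    · rw [if_pos hb, if_pos (by omega : (0:Int) + PySem.Str.len l > m - c)]
      simp
    · rw [if_neg hb, if_neg (by omega : ¬ ((0:Int) + PySem.Str.len l > m - c))]
      rw [ih m (i+1) (c + PySem.Str.len l), ih (m - c) (0+1) (0 + PySem.Str.len l)]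
      have h2 : m - c - (0 + (PySem.Str.len l : Int)) = m - (c + PySem.Str.len l) := by ring
      rw [h2]
      simp [Prod.ext_iff]; constructor <;> ring

theorem pvCsum_cons (l : String) (ls : List String) (k : Nat) :
    pvCsum (l :: ls) (k + 1) = PySem.Str.len l + pvCsum ls k := by
  simp [pvCsum, List.take_succ_cons]

-- A's loop breaks at the least index whose cumulative count exceeds the budget
theorem pvFindIdxA_char (lines : List String) (m : Int) (hne : lines ≠ [])
    (h : m < pvCsum lines lines.length) :
    ∃ j : Nat, j < lines.length ∧
      pvFindIdxA lines m 0 0 = ((j : Int), pvCsum lines j) ∧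
      (∀ i : Nat, i < j → ¬ (m < pvCsum lines (i + 1))) ∧
      m < pvCsum lines (j + 1) := by
  induction lines generalizing m with
  | nil => exact absurd rfl hne
  | cons l ls ih =>
    by_cases hb : (0:Int) + PySem.Str.len l > m
    · refine ⟨0, by simp, ?_, by omega, ?_⟩
      · simp only [pvFindIdxA, if_pos hb]
        simp [pvCsum]
      · rw [pvCsum_cons]
        simp only [pvCsum, List.take_zero, List.map_nil, List.sum_nil]
        omega
    · have hne' : ls ≠ [] := by
        intro hnil; subst hnil
        simp only [List.length_cons, List.length_nil, pvCsum_cons] at h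
        simp only [pvCsum, List.take_zero, List.map_nil, List.sum_nil] at h
        omega
      have h' : m - PySem.Str.len l < pvCsum ls ls.length := by
        have := h
        simp only [List.length_cons, pvCsum_cons] at this
        omega
      obtain ⟨j', hj'lt, hj'eq, hj'min, hj'cond⟩ := ih (m - PySem.Str.len l) hne' h'
      refine ⟨j' + 1, by simpa using hj'lt, ?_, ?_, ?_⟩
      · simp only [pvFindIdxA, if_neg hb]
        rw [pvFindIdxA_shift ls m (0+1) (0 + PySem.Str.len l)]
        have harg : m - (0 + (PySem.Str.len l : Int)) = m - PySem.Str.len l := by ring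
        rw [harg, hj'eq]
        rw [pvCsum_cons]
        simp only [Prod.mk.injEq]
        refine ⟨by push_cast; ring, by ring⟩
      · intro i hi
        cases i with
        | zero =>
          rw [pvCsum_cons]
          simp only [pvCsum, List.take_zero, List.map_nil, List.sum_nil]
          omega
        | succ i' =>
          have := hj'min i' (by omega)
          rw [pvCsum_cons]
          omega
      · rw [pvCsum_cons]
        omega

-- the value B reads from the prefix table
def pvPg (lines : List String) (i : Int) : Int :=
  (PySem.List.pyGet? (pvPrefList lines 0) i).getD 0

theorem pvPg_eq (lines : List String) (i : Int) (h0 : 0 ≤ i) (hn : i ≤ (lines.length : Int)) :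
    pvPg lines i = pvCsum lines i.toNat := by
  unfold pvPg
  have hcast : i = ((i.toNat : Nat) : Int) := by omega
  rw [hcast, PySem.List.pyGet?_natCast, pvPrefList_get lines 0 i.toNat (by omega)]
  simp
  congr 1
  omega

-- binary-search invariant for B (on the reference prefix list)
theorem pvBsearchGo_spec (lines : List String) (m : Int) (fuel : Nat) :
    ∀ (lo hi : Int), (hi - lo).toNat < fuel → 0 ≤ lo → lo ≤ hi →
    hi ≤ (lines.length : Int) - 1 →
    lo ≤ pvBsearchGo fuel (pvPrefList lines 0) m lo hi ∧
    pvBsearchGo fuel (pvPrefList lines 0) m lo hi ≤ hi ∧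
    (∀ i : Int, lo ≤ i → i < pvBsearchGo fuel (pvPrefList lines 0) m lo hi → ¬ (m < pvPg lines (i + 1))) ∧
    (pvBsearchGo fuel (pvPrefList lines 0) m lo hi < hi → m < pvPg lines (pvBsearchGo fuel (pvPrefList lines 0) m lo hi + 1)) := by
  induction fuel with
  | zero => intro lo hi hk; omega
  | succ fuel ih =>
    intro lo hi hk hlo hlohi hhi
    rw [pvBsearchGo]
    by_cases h : lo < hi
    · rw [if_pos h]
      have hmidlo := (PySem.Int.floordiv_two_mid_bounds (le_of_lt h)).1
      have hmidhi : PySem.Int.floordiv (lo + hi) 2 < hi :=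
        (PySem.Int.floordiv_lt_iff_lt_mul (by omega)).mpr (by omega)
      set mid := PySem.Int.floordiv (lo + hi) 2 with hmid
      simp only []
      by_cases hc : ((PySem.List.pyGet? (pvPrefList lines 0) (mid + 1)).getD 0) > m
      · rw [if_pos hc]
        obtain ⟨h1, h2, h3, h4⟩ := ih lo mid (by omega) hlo hmidlo (by omega)
        refine ⟨h1, by omega, h3, ?_⟩
        intro _
        rcases lt_or_eq_of_le h2 with hlt | heq
        · exact h4 hlt
        · rw [heq]; exact hc
      · rw [if_neg hc]
        obtain ⟨h1, h2, h3, h4⟩ := ih (mid + 1) hi (by omega) (by omega) (by omega) hhi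
        refine ⟨by omega, h2, ?_, h4⟩
        intro i hilo hir hcondi
        by_cases hile : mid + 1 ≤ i
        · exact h3 i hile hir hcondi
        · -- i ≤ mid: monotonicity of the prefix sums contradicts ¬cond mid
          have hi1 : pvPg lines (i + 1) = pvCsum lines (i + 1).toNat :=
            pvPg_eq lines (i + 1) (by omega) (by omega)
          have hm1 : pvPg lines (mid + 1) = pvCsum lines (mid + 1).toNat :=
            pvPg_eq lines (mid + 1) (by omega) (by omega)
          have hmono := pvCsum_mono lines (i + 1).toNat (mid + 1).toNat (by omega)
          rw [hi1] at hcondi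
          have hpg : pvPg lines (mid + 1) ≤ m := by unfold pvPg; omega
          rw [hm1] at hpg
          omega
    · rw [if_neg h]
      exact ⟨le_refl lo, by omega, by omega, by omega⟩

theorem pvBsearchB_spec (lines : List String) (m lo hi : Int)
    (hlo : 0 ≤ lo) (hlohi : lo ≤ hi) (hhi : hi ≤ (lines.length : Int) - 1) :
    lo ≤ pvBsearchB (pvPrefList lines 0) m lo hi ∧
    pvBsearchB (pvPrefList lines 0) m lo hi ≤ hi ∧
    (∀ i : Int, lo ≤ i → i < pvBsearchB (pvPrefList lines 0) m lo hi → ¬ (m < pvPg lines (i + 1))) ∧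
    (pvBsearchB (pvPrefList lines 0) m lo hi < hi → m < pvPg lines (pvBsearchB (pvPrefList lines 0) m lo hi + 1)) := by
  unfold pvBsearchB
  exact pvBsearchGo_spec lines m _ lo hi (by omega) hlo hlohi hhi

theorem pvSliceEmpty (t : Int) : PySem.Str.slice "" none (some t) = "" := by
  apply String.ext
  simp [PySem.Str.toList_slice, PySem.Chars.slice_eq_listSlice, PySem.List.slice]

-- ===== VERDICT (by name: the statement is the Claim_ definition above) =====
theorem truncate_by_char_count_py_spec : Claim_equal_truncate_by_char_count_py := by
  intro lines m hDom hPre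
  unfold Spec_truncate_by_char_count_py truncate_by_char_count_py truncate_by_char_count_py_alt
  have hguardB : ((PySem.List.pyGet? (pvPrefixB lines) (-1)).getD 0) = pvCsum lines lines.length := by
    rw [pvPrefixB_eq, PySem.List.pyGet?_neg_one, pvPrefList_getLast]
    simp
  by_cases hle : pvCsum lines lines.length ≤ m
  · rw [if_pos (by rw [pvLenJoin]; exact hle), if_pos (by rw [hguardB]; exact hle)]
  · have hm : m < pvCsum lines lines.length := by omega
    have hne : lines ≠ [] := by
      intro hnil; subst hnil
      simp only [pvCsum, List.take_nil, List.map_nil, List.sum_nil] at hm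
      rcases hPre with h | h
      · exact h rfl
      · omega
    have hnpos : 0 < lines.length := List.length_pos_iff.mpr hne
    rw [if_neg (by rw [pvLenJoin]; exact hle), if_neg (by rw [hguardB]; exact hle)]
    obtain ⟨j, hjlt, hjeq, hjmin, hjcond⟩ := pvFindIdxA_char lines m hne hm
    rw [pvPrefixB_eq]
    obtain ⟨hr0, hrhi, hrmin, hrcond⟩ :=
      pvBsearchB_spec lines m 0 ((lines.length : Int) - 1)
        (le_refl 0) (by omega) (by omega)
    set r := pvBsearchB (pvPrefList lines 0) m 0 ((lines.length : Int) - 1) with hrdef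
    have hcond_r : m < pvPg lines (r + 1) := by
      rcases lt_or_eq_of_le hrhi with h' | h'
      · exact hrcond h'
      · rw [h', pvPg_eq _ _ (by omega) (by omega)]
        have ht : ((lines.length : Int) - 1 + 1).toNat = lines.length := by omega
        rw [ht]
        exact hm
    have hrj : r = (j : Int) := by
      by_contra hne2
      rcases lt_or_gt_of_ne hne2 with hlt | hgt
      · have hmin := hjmin r.toNat (by omega)
        rw [pvPg_eq _ _ (by omega) (by omega)] at hcond_r
        have ht : (r + 1).toNat = r.toNat + 1 := by omega
        rw [ht] at hcond_r
        exact hmin hcond_r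
      · have hb := hrmin (j : Int) (by omega) (by omega)
        rw [pvPg_eq _ _ (by omega) (by omega)] at hb
        have ht : ((j : Int) + 1).toNat = j + 1 := by omega
        rw [ht] at hb
        exact hb hjcond
    simp only [hjeq, hrj]
    have hpgr : (PySem.List.pyGet? (pvPrefList lines 0) (j : Int)).getD 0 = pvCsum lines j := by
      have := pvPg_eq lines (j : Int) (by omega) (by omega)
      unfold pvPg at this
      simpa using this
    rw [hpgr]
    have hfl : (PySem.List.pyGet? lines (j : Int)).getD "" = lines[j] := by
      rw [PySem.List.pyGet?_natCast, List.getElem?_eq_getElem hjlt]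
      simp
    rw [hfl]
    by_cases hflE : lines[j] = ""
    · rw [hflE]
      simp only [ne_eq, not_true_eq_false, if_false]
      rw [pvSliceEmpty]
    · rw [if_pos hflE]
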